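-- pv_equiv track=rewrite | github.com/ahnhongjo/CodingTest | 코딩테스트_파이썬/level2/메뉴 리뉴얼.py | whatmax
-- ===== SOURCE A (Python) =====
-- def whatmax(orderlist, orders):
--     result = []
--     max_cnt = 1
--     for one_order in orderlist:
--         cnt = 0
--         for order in orders:
--             cntup = True
--             for i in one_order:
--                 if i not in order:
--                     cntup = False
--             if cntup:
--                 cnt += 1
--         if cnt ==1:
--             continue
--         if cnt > max_cnt:
--             result = []
--             max_cnt = cnt
--             result.append(one_order)
--             continue
--         elif cnt == max_cnt:
--             result.append(one_order)
--
--     return result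
-- ===== SOURCE B (Python) =====
-- def whatmax(orderlist, orders):
--     def mask(s):
--         m = 0
--         for ch in s:
--             m |= 1 << ord(ch)
--         return m
--     cand_masks = [mask(c) for c in orderlist]
--     freq = {}
--     for o in orders:
--         m = mask(o)
--         freq[m] = freq.get(m, 0) + 1
--     counts = [0] * len(orderlist)
--     for om, mult in freq.items():
--         counts = [c + mult if cm & om == cm else c
--                   for c, cm in zip(counts, cand_masks)]
--     best = max(counts, default=0)
--     if best < 2:
--         return []
--     return [c for c, k in zip(orderlist, counts) if k == best]
-- ===== Notes on version B (the rewrite author's own statement) =====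
-- stated objective: faster
-- what changed: Encodes every string as a character bitmask, builds a frequency dict over distinct order masks, and accumulates counts transposed (one vectorised pass over the candidate list per distinct order mask, subset test = one bitwise and), then takes the max once and filters; A instead scans every character of every candidate against every character of every order with a running max.
import Mathlib
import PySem

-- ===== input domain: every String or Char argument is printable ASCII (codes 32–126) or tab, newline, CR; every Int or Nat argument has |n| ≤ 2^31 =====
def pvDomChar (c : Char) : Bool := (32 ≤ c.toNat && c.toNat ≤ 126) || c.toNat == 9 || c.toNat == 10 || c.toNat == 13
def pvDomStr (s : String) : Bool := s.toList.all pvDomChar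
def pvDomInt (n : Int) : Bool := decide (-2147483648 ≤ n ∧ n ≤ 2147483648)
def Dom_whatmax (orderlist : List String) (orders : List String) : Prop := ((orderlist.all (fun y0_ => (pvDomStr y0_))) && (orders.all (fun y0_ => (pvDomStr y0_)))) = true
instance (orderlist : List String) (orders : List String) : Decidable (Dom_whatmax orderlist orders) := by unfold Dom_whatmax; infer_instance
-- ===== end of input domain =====

-- B encodes strings as character bitmasks, builds a frequency dict over distinct order masks, and accumulates counts transposed over that dict, then takes the max once and filters (objective: faster, in a timing run).


-- ===== PORT A =====
-- inner loop 'for i in one_order: if i not in order: cntup = False'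
def aCntup (oo order : String) : Bool :=
  oo.toList.foldl (fun cntup i => if !(order.toList.contains i) then false else cntup) true

-- middle loop 'for order in orders: … if cntup: cnt += 1'
def aCnt (orders : List String) (oo : String) : Int :=
  orders.foldl (fun cnt order => if aCntup oo order then cnt + 1 else cnt) 0

def whatmax (orderlist : List String) (orders : List String) : List String :=
  (orderlist.foldl
    (fun (st : List String × Int) one_order =>
      let cnt := aCnt orders one_order
      if cnt = 1 then st
      else if cnt > st.2 then ([one_order], cnt)
      else if cnt = st.2 then (st.1 ++ [one_order], st.2)
      else st)
    ([], 1)).1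

-- ===== PORT B =====
-- 'm |= 1 << ord(ch)' over the string
def bMask (s : String) : Nat :=
  s.toList.foldl (fun m ch => m ||| (1 <<< ch.toNat)) 0

def whatmax_alt (orderlist : List String) (orders : List String) : List String :=
  let candMasks := orderlist.map bMask
  -- 'freq[m] = freq.get(m, 0) + 1' over the order masks
  let freq := (orders.map bMask).foldl
    (fun (d : PySem.Dict Nat Int) m => d.insert m (d.getD m 0 + 1)) PySem.Dict.empty
  -- 'for om, mult in freq.items(): counts = [c + mult if cm & om == cm else c for c, cm in zip(counts, cand_masks)]'
  let counts := freq.items.foldl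
    (fun (counts : List Int) om =>
      (counts.zip candMasks).map (fun p => if p.2 &&& om.1 == p.2 then p.1 + om.2 else p.1))
    (List.replicate orderlist.length 0)
  -- 'max(counts, default=0)': every count is ≥ 0, so folding max from 0 is exact
  let best := counts.foldl max 0
  if best < 2 then []
  else ((orderlist.zip counts).filter (fun p => p.2 == best)).map Prod.fst

-- ===== PRECONDITION & SPEC =====
def Spec_whatmax (orderlist : List String) (orders : List String) (out : List String) : Prop := out = whatmax_alt orderlist orders
instance (orderlist : List String) (orders : List String) (out : List String) : Decidable (Spec_whatmax orderlist orders out) := by unfold Spec_whatmax; infer_instance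

-- ===== CLAIM (what is proved, stated in full; the proofs are below) =====
def Claim_equal_whatmax : Prop := ∀ (orderlist : List String) (orders : List String), Dom_whatmax orderlist orders → Spec_whatmax orderlist orders (whatmax orderlist orders)

-- ===== LEMMAS AND PROOFS =====

-- the inner A-loop is an 'all' check
theorem aCntup_eq_all (oo order : String) :
    aCntup oo order = oo.toList.all (fun c => order.toList.contains c) := by
  unfold aCntup
  suffices h : ∀ (l : List Char) (b : Bool),
      l.foldl (fun cntup i => if !(order.toList.contains i) then false else cntup) b
        = (b && l.all (fun c => order.toList.contains c)) by
    simpa using h oo.toList true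
  intro l
  induction l with
  | nil => simp
  | cons x xs ih =>
      intro b
      simp only [List.foldl_cons, List.all_cons, ih]
      by_cases hx : order.toList.contains x = true <;>
        simp [Bool.and_comm, Bool.and_assoc]

-- bit k of a string's mask is set iff some character of the string has code k
theorem testBit_bMask (s : String) (k : Nat) :
    (bMask s).testBit k = s.toList.any (fun c => c.toNat == k) := by
  unfold bMask
  suffices h : ∀ (l : List Char) (m : Nat),
      (l.foldl (fun m ch => m ||| (1 <<< ch.toNat)) m).testBit k
        = (m.testBit k || l.any (fun c => c.toNat == k)) by
    simpa using h s.toList 0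
  intro l
  induction l with
  | nil => simp
  | cons x xs ih =>
      intro m
      simp only [List.foldl_cons, List.any_cons, ih, Nat.testBit_or]
      have hx : (1 <<< x.toNat).testBit k = (x.toNat == k) := by
        rw [Nat.one_shiftLeft, Nat.testBit_two_pow]
        by_cases h : x.toNat = k <;> simp [h]
      rw [hx]
      by_cases h1 : m.testBit k <;> by_cases h2 : (x.toNat == k) <;> simp [h1, h2]

-- the bitmask subset test computes A's inner check
theorem mask_subset_eq_cntup (oo order : String) :
    (bMask oo &&& bMask order == bMask oo) = aCntup oo order := by
  rw [aCntup_eq_all, Bool.eq_iff_iff, beq_iff_eq, List.all_eq_true]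
  constructor
  · intro h c hc
    have hb : (bMask oo).testBit c.toNat = true := by
      rw [testBit_bMask]
      exact List.any_eq_true.mpr ⟨c, hc, by simp⟩
    have := congrArg (fun n => n.testBit c.toNat) h
    simp only [Nat.testBit_and, hb, Bool.and_eq_true] at this
    rcases (List.any_eq_true.mp ((testBit_bMask order c.toNat) ▸ this.2)) with ⟨c', hc', he⟩
    have hnat : c'.toNat = c.toNat := by simpa using he
    have : c' = c := Char.ext (UInt32.toNat_inj.mp hnat)
    simp [← this, hc']
  · intro h
    apply Nat.eq_of_testBit_eq
    intro i
    rw [Nat.testBit_and]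
    by_cases hb : (bMask oo).testBit i = true
    · rcases List.any_eq_true.mp ((testBit_bMask oo i) ▸ hb) with ⟨c, hc, he⟩
      have hcord : (bMask order).testBit i = true := by
        rw [testBit_bMask]
        exact List.any_eq_true.mpr ⟨c, by simpa using h c hc, he⟩
      simp [hb, hcord]
    · simp [Bool.eq_false_iff.mpr hb]

-- pulling the start value out of A's counting fold
theorem aCnt_start (oo : String) (l : List String) :
    ∀ a : Int, l.foldl (fun cnt order => if aCntup oo order then cnt + 1 else cnt) a
      = a + l.foldl (fun cnt order => if aCntup oo order then cnt + 1 else cnt) 0 := by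
  induction l with
  | nil => simp
  | cons y ys ih =>
      intro a
      simp only [List.foldl_cons]
      rw [ih, ih (if aCntup oo y then (0:Int) + 1 else 0)]
      split_ifs <;> ring

-- A's count is a countP
theorem aCnt_eq_countP (orders : List String) (oo : String) :
    aCnt orders oo = (orders.countP (fun order => aCntup oo order) : Int) := by
  unfold aCnt
  induction orders with
  | nil => simp
  | cons x xs ih =>
      rw [List.foldl_cons, aCnt_start oo xs, ih, List.countP_cons]
      split_ifs with h <;> push_cast <;> ring

-- weighted sum over an item list
def wsum (items : List (Nat × Int)) (cm : Nat) : Int :=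
  items.foldl (fun a p => if cm &&& p.1 == cm then a + p.2 else a) 0

theorem wsum_start (items : List (Nat × Int)) (cm : Nat) (a : Int) :
    items.foldl (fun a p => if cm &&& p.1 == cm then a + p.2 else a) a = a + wsum items cm := by
  induction items generalizing a with
  | nil => simp [wsum]
  | cons x xs ih =>
      simp only [wsum, List.foldl_cons] at *
      rw [ih, ih (if cm &&& x.1 == cm then (0:Int) + x.2 else 0)]
      split_ifs <;> ring

theorem wsum_cons (p : Nat × Int) (items : List (Nat × Int)) (cm : Nat) :
    wsum (p :: items) cm = (if cm &&& p.1 == cm then p.2 else 0) + wsum items cm := by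
  simp only [wsum, List.foldl_cons]
  rw [wsum_start]
  simp only [wsum]
  split_ifs <;> ring

-- countP splits off one value's occurrences
theorem countP_filter_ne (p : Nat → Bool) (k : Nat) (ms : List Nat) :
    ms.countP p = (ms.filter (fun x => x ≠ k)).countP p + (if p k then ms.count k else 0) := by
  induction ms with
  | nil => simp
  | cons x xs ih =>
      by_cases hxk : x = k
      · subst hxk
        by_cases hp : p x = true <;>
          simp [List.countP_cons, List.filter_cons, List.count_cons, hp, ih] <;> omega
      · have hne : (x ≠ k) = True := by simp [hxk]
        by_cases hp : p x = true <;>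
          simp [List.countP_cons, List.filter_cons, List.count_cons, hp, hxk, ih] <;> omega

-- weighted sum over (key, multiplicity) pairs = countP over the multiset
theorem wsum_keys_count (cm : Nat) (p : Nat → Bool) (hp : ∀ m, p m = (cm &&& m == cm)) :
    ∀ (keys : List Nat), keys.Nodup → ∀ (ms : List Nat), (∀ x ∈ ms, x ∈ keys) →
      wsum (keys.map (fun k => (k, (ms.count k : Int)))) cm = (ms.countP p : Int) := by
  intro keys
  induction keys with
  | nil =>
      intro _ ms hms
      have : ms = [] := List.eq_nil_iff_forall_not_mem.mpr (fun x hx => by simpa using hms x hx)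
      simp [this, wsum]
  | cons k ks ih =>
      intro hnd ms hms
      have hk_not : k ∉ ks := (List.nodup_cons.mp hnd).1
      have hnd' : ks.Nodup := (List.nodup_cons.mp hnd).2
      set ms' := ms.filter (fun x => x ≠ k) with hms'
      have hcounts : ks.map (fun k' => (k', (ms.count k' : Int)))
          = ks.map (fun k' => (k', (ms'.count k' : Int))) := by
        apply List.map_congr_left
        intro k' hk'
        have hne : k' ≠ k := fun h => hk_not (h ▸ hk')
        have : ms'.count k' = ms.count k' := by
          rw [hms', List.count_filter]
          simp [hne]
        rw [this]
      have hmem' : ∀ x ∈ ms', x ∈ ks := by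
        intro x hx
        rcases List.mem_filter.mp hx with ⟨hxm, hxk⟩
        rcases List.mem_cons.mp (hms x hxm) with h | h
        · exact absurd h (by simpa using hxk)
        · exact h
      have hsplit := countP_filter_ne p k ms
      simp only [List.map_cons]
      rw [wsum_cons, hcounts, ih hnd' ms' hmem']
      rw [hp k] at hsplit
      by_cases hsub : (cm &&& k == cm) = true
      · rw [if_pos hsub, hsplit, if_pos hsub]
        push_cast
        ring
      · rw [if_neg hsub, hsplit, if_neg hsub]
        push_cast
        ring

-- one transposed update step, pointwise
theorem zip_map_step (masks : List Nat) (g : Nat → Int) (om : Nat × Int) :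
    ((masks.map g).zip masks).map (fun p => if p.2 &&& om.1 == p.2 then p.1 + om.2 else p.1)
      = masks.map (fun m => if m &&& om.1 == m then g m + om.2 else g m) := by
  induction masks with
  | nil => rfl
  | cons x xs ih => simp only [List.map_cons, List.zip_cons_cons, ih]

-- B's transposed accumulation, characterised pointwise
theorem counts_foldl (items : List (Nat × Int)) (masks : List Nat) (g : Nat → Int) :
    items.foldl
      (fun (counts : List Int) om =>
        (counts.zip masks).map (fun p => if p.2 &&& om.1 == p.2 then p.1 + om.2 else p.1))
      (masks.map g)
    = masks.map (fun m => g m + wsum items m) := by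
  induction items generalizing g with
  | nil => simp [wsum]
  | cons om rest ih =>
      simp only [List.foldl_cons]
      rw [zip_map_step, ih]
      apply List.map_congr_left
      intro m _
      rw [wsum_cons]
      split_ifs <;> ring

-- max-fold facts
theorem le_foldl_max (l : List Int) : ∀ m : Int, m ≤ l.foldl max m := by
  induction l with
  | nil => intro m; simp
  | cons x xs ih => intro m; exact le_trans (le_max_left m x) (ih _)

theorem foldl_max_max (l : List Int) :
    ∀ a b : Int, l.foldl max (max a b) = max a (l.foldl max b) := by
  induction l with
  | nil => intro a b; simp
  | cons x xs ih =>
      intro a b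
      simp only [List.foldl_cons]
      rw [max_assoc, ih]

-- the characterisation of A's accumulator loop
theorem loopA_spec (f : String → Int) :
    ∀ (l : List String) (res : List String) (m : Int), 1 ≤ m →
      l.foldl
        (fun (st : List String × Int) x =>
          if f x = 1 then st
          else if f x > st.2 then ([x], f x)
          else if f x = st.2 then (st.1 ++ [x], st.2)
          else st)
        (res, m)
      = (((if (l.map f).foldl max m = m then res else [])
            ++ l.filter (fun x => f x == (l.map f).foldl max m && !(f x == 1)),
          (l.map f).foldl max m)) := by
  intro l
  induction l with
  | nil => intro res m _; simp
  | cons x xs ih =>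
      intro res m hm
      simp only [List.foldl_cons, List.map_cons]
      by_cases h1 : f x = 1
      · have hmax : max m (f x) = m := max_eq_left (by omega)
        rw [if_pos h1, ih res m hm]; simp only [hmax]
        simp [h1]
      · rw [if_neg h1]
        by_cases h2 : f x > m
        · rw [if_pos h2]
          have hmax : max m (f x) = f x := max_eq_right (by omega)
          rw [ih [x] (f x) (by omega)]; simp only [hmax]
          have hMge : f x ≤ (xs.map f).foldl max (f x) := le_foldl_max _ _
          have hMne : (xs.map f).foldl max (f x) ≠ m := by omega
          by_cases hx : f x = (xs.map f).foldl max (f x)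
          · have hc : ¬ (f x = m) := by omega
            simp [← hx, hc, h1]
          · have hx' : ¬ ((xs.map f).foldl max (f x) = f x) := fun h => hx h.symm
            simp [List.filter_cons, hMne, hx, hx', h1]
        · rw [if_neg h2]
          have hle : f x ≤ m := by omega
          have hmax : max m (f x) = m := max_eq_left hle
          by_cases h3 : f x = m
          · rw [if_pos h3, ih (res ++ [x]) m hm]; simp only [hmax]
            by_cases hM : (xs.map f).foldl max m = m
            · have hm1 : ¬ (m = 1) := by omega
              simp [List.filter_cons, hM, h3, hm1, List.append_assoc]
            · have hne : ¬ (f x = (xs.map f).foldl max m) := by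
                have := le_foldl_max (xs.map f) m; omega
              simp [hM, hne]
          · rw [if_neg h3, ih res m hm]; simp only [hmax]
            have hne : ¬ (f x = (xs.map f).foldl max m) := by
              have := le_foldl_max (xs.map f) m; omega
            simp [hne]

-- zip-with-mapped-counts filter = plain filter
theorem zip_map_filter (f : String → Int) (b : Int) :
    ∀ l : List String,
      (((l.zip (l.map f)).filter (fun p => p.2 == b)).map Prod.fst)
        = l.filter (fun x => f x == b) := by
  intro l
  induction l with
  | nil => rfl
  | cons x xs ih =>
      simp only [List.map_cons, List.zip_cons_cons, List.filter_cons]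
      by_cases h : f x = b <;> simp [h, ih]

-- B's counts list = map of A's count function
theorem counts_eq (orderlist orders : List String) :
    (((orders.map bMask).foldl
        (fun (d : PySem.Dict Nat Int) m => d.insert m (d.getD m 0 + 1)) PySem.Dict.empty).items.foldl
      (fun (counts : List Int) om =>
        ((counts.zip (orderlist.map bMask)).map
          (fun p => if p.2 &&& om.1 == p.2 then p.1 + om.2 else p.1)))
      (List.replicate orderlist.length 0))
    = orderlist.map (aCnt orders) := by
  rw [PySem.Dict.foldl_insert_getD_add_one_eq_counter, PySem.Dict.items_counter]
  have hrep : List.replicate orderlist.length (0 : Int)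
      = (orderlist.map bMask).map (fun _ => (0 : Int)) := by
    induction orderlist with
    | nil => rfl
    | cons x xs ih => simpa [List.replicate_succ] using ih
  rw [hrep, counts_foldl, List.map_map]
  apply List.map_congr_left
  intro oo _
  simp only [Function.comp_apply, zero_add]
  rw [wsum_keys_count (bMask oo) (fun m => bMask oo &&& m == bMask oo) (fun _ => rfl)
        (PySem.Set.ofList (orders.map bMask)) (PySem.Set.nodup_ofList _)
        (orders.map bMask) (fun x hx => (PySem.Set.mem_ofList _ x).mpr hx),
      aCnt_eq_countP]
  congr 1
  rw [List.countP_map]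
  exact List.countP_congr
    (fun order _ => by simp only [Function.comp_apply]; rw [mask_subset_eq_cntup])

-- ===== VERDICT (by name: the statement is the Claim_ definition above) =====
theorem whatmax_spec : Claim_equal_whatmax := by
  unfold Claim_equal_whatmax
  intro orderlist orders _
  simp only [Spec_whatmax, whatmax, whatmax_alt]
  rw [counts_eq orderlist orders]
  set f := aCnt orders with hf
  rw [loopA_spec f orderlist [] 1 (le_refl 1)]
  set best := (orderlist.map f).foldl max 0 with hbest
  have hM : (orderlist.map f).foldl max 1 = max 1 best := by
    have := foldl_max_max (orderlist.map f) 1 0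
    simpa using this
  rw [hM]
  by_cases hb : best < 2
  · rw [if_pos hb]
    have h1 : max 1 best = 1 := max_eq_left (by omega)
    rw [h1]
    simp
  · rw [if_neg hb]
    have h1 : max 1 best = best := max_eq_right (by omega)
    rw [h1]
    rw [zip_map_filter f best orderlist]
    have hfilter : orderlist.filter (fun x => f x == best && !(f x == 1))
        = orderlist.filter (fun x => f x == best) := by
      apply List.filter_congr
      intro x _
      by_cases h : f x = best
      · simp [h]; omega
      · simp [h]
    rw [hfilter]
    by_cases hM1 : best = 1
    · omega
    · simp [hM1]
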